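-- pv_equiv track=rewrite | github.com/yon826/2023_TGwinG_FE_youngmin | 윤영민_4주차_과제.py | double
-- ===== SOURCE A (Python) =====
-- def double(lst):
--     n = len(lst)
--     lst.sort()
--     x = 0
--     for i in range(n):
--         for j in range(n):
--             if lst[i]*2 == lst[j]:
--                 x = x + 1
--     return x
-- ===== SOURCE B (Python) =====
-- def double(lst):
--     freq = {}
--     for v in lst:
--         freq[v] = freq.get(v, 0) + 1
--     return sum(c * freq.get(2 * v, 0) for v, c in freq.items())
-- ===== Notes on version B (the rewrite author's own statement) =====
-- stated objective: faster
-- what changed: Replaced the sort plus O(n^2) nested index scan with a single-pass frequency dictionary, summing count(v)*count(2v) over the distinct values.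
import Mathlib
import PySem

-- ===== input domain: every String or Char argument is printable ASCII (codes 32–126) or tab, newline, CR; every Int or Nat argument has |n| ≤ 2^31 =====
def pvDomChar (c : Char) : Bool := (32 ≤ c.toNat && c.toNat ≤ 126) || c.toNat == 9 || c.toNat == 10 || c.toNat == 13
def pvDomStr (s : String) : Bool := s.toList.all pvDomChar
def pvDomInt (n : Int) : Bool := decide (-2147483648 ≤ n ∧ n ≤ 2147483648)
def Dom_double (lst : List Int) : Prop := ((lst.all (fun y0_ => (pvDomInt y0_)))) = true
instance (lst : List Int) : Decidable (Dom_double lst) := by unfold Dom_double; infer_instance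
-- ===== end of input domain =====

-- B replaces A's sort + nested index scan by a one-pass frequency dictionary (objective: faster).
-- A sorts its argument in place; B does not mutate it — the equivalence proved here is about the return value only.

-- ===== PORT A =====
def double (lst : List Int) : Int :=
  let n : Int := lst.length
  let s := PySem.List.sorted lst (fun x => x) false
  (PySem.List.pyRange 0 n).foldl (fun x i =>
    (PySem.List.pyRange 0 n).foldl (fun x j =>
      if PySem.List.pyGetD s i 0 * 2 == PySem.List.pyGetD s j 0 then x + 1 else x) x) 0

-- ===== PORT B =====
def double_alt (lst : List Int) : Int :=
  let freq : PySem.Dict Int Int :=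
    lst.foldl (fun d v => d.insert v (d.getD v 0 + 1)) PySem.Dict.empty
  (freq.items.map (fun vc => vc.2 * freq.getD (2 * vc.1) 0)).sum

-- ===== PRECONDITION & SPEC =====
def Spec_double (lst : List Int) (out : Int) : Prop := out = double_alt lst
instance (lst : List Int) (out : Int) : Decidable (Spec_double lst out) := by unfold Spec_double; infer_instance

-- ===== CLAIM (what is proved, stated in full; the proofs are below) =====
def Claim_equal_double : Prop := ∀ (lst : List Int), Dom_double lst → Spec_double lst (double lst)

-- ===== LEMMAS AND PROOFS =====
-- Both sides compute ∑_{v occurrence of lst} count(2*v, lst): A over the sorted copy and all index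
-- pairs, B grouped by distinct values with multiplicities.

-- grouping: summing f over all occurrences = summing count(k) * f k over a nodup list of the values
theorem pv_group_sum (f : Int → Int) (d l : List Int) (hnd : d.Nodup)
    (hmem : ∀ x ∈ l, x ∈ d) :
    (d.map (fun k => (l.count k : Int) * f k)).sum = (l.map f).sum := by
  induction d generalizing l with
  | nil =>
      cases l with
      | nil => simp
      | cons a t => exact absurd (hmem a (by simp)) (by simp)
  | cons k d' ih =>
      have hperm := List.filter_append_perm (fun x => x == k) l
      have hsplit : (l.map f).sum
          = ((l.filter (fun x => x == k)).map f).sum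
            + ((l.filter (fun x => !(x == k))).map f).sum := by
        rw [← List.sum_append, ← List.map_append]
        exact (hperm.map f).sum_eq.symm
      have hfeq : l.filter (fun x => x == k) = List.replicate (l.count k) k := by
        simpa using List.filter_eq (l := l) k
      have hhead : ((l.filter (fun x => x == k)).map f).sum = (l.count k : Int) * f k := by
        rw [hfeq]; simp [List.map_replicate, List.sum_replicate]
      have hnd' : d'.Nodup := hnd.of_cons
      have hknot : k ∉ d' := (List.nodup_cons.mp hnd).1
      have hmem' : ∀ x ∈ l.filter (fun x => !(x == k)), x ∈ d' := by
        intro x hx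
        rcases List.mem_filter.mp hx with ⟨hxl, hxk⟩
        have hne : x ≠ k := by simpa using hxk
        have := hmem x hxl
        simp only [List.mem_cons] at this
        tauto
      have hcount : ∀ k' ∈ d', (l.filter (fun x => !(x == k))).count k' = l.count k' := by
        intro k' hk'
        have hne : k' ≠ k := fun h => hknot (h ▸ hk')
        simp [List.count_filter, hne]
      rw [List.map_cons, List.sum_cons, hsplit, hhead]
      congr 1
      rw [← ih (l.filter (fun x => !(x == k))) hnd' hmem']
      exact congrArg List.sum
        (List.map_congr_left (fun k' hk' => by rw [hcount k' hk']))

-- A's inner loop over j counts the occurrences of 2*v in s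
theorem pv_inner (s : List Int) (v x : Int) :
    (PySem.List.pyRange 0 (s.length : Int)).foldl
      (fun x j => if v * 2 == PySem.List.pyGetD s j 0 then x + 1 else x) x
    = x + (s.count (v * 2) : Int) := by
  have hlen : (s.length : Int) = PySem.List.len s := by simp [PySem.List.len]
  rw [hlen,
    ← List.foldl_map (f := fun j => PySem.List.pyGetD s j 0)
        (g := fun (x y : Int) => if v * 2 == y then x + 1 else x),
    PySem.List.map_pyGetD_pyRange_zero s 0,
    PySem.List.foldl_if_add_one (fun y => v * 2 == y)]
  congr 1
  norm_cast
  unfold List.count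
  exact (List.countP_congr (fun y _ => by simp only [beq_iff_eq]; omega)).symm

-- A's value as a sum over the sorted list
theorem pv_a_eq (lst : List Int) :
    double lst
    = ((PySem.List.sorted lst (fun x => x) false).map
        (fun v => ((PySem.List.sorted lst (fun x => x) false).count (v * 2) : Int))).sum := by
  unfold double
  set s := PySem.List.sorted lst (fun x => x) false with hs
  have hlen2 : (lst.length : Int) = (s.length : Int) := by
    rw [hs, (PySem.List.sorted_perm lst (fun x => x) false).length_eq]
  simp only [hlen2]
  rw [PySem.List.foldl_congr_mem _ _
      (fun x i => x + (s.count (PySem.List.pyGetD s i 0 * 2) : Int)) _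
      (fun acc i _ => pv_inner s (PySem.List.pyGetD s i 0) acc)]
  have hlen : (s.length : Int) = PySem.List.len s := by simp [PySem.List.len]
  rw [hlen,
    ← List.foldl_map (f := fun i => PySem.List.pyGetD s i 0)
        (g := fun (x v : Int) => x + (s.count (v * 2) : Int)),
    PySem.List.map_pyGetD_pyRange_zero s 0,
    ]
  simp [PySem.List.foldl_add]

theorem double_spec' (lst : List Int) : double lst = double_alt lst := by
  have hperm := PySem.List.sorted_perm lst (fun x => x) false
  -- A side: sum over lst of count(2*v)
  have ha : double lst = (lst.map (fun v => (lst.count (2 * v) : Int))).sum := by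
    rw [pv_a_eq]
    set s := PySem.List.sorted lst (fun x => x) false
    have h1 : s.map (fun v => (s.count (v * 2) : Int))
        = s.map (fun v => (lst.count (2 * v) : Int)) := by
      apply List.map_congr_left
      intro v _
      rw [hperm.count_eq, mul_comm]
    rw [h1]
    exact (hperm.map (fun v => (lst.count (2 * v) : Int))).sum_eq
  -- B side: grouped sum over the distinct values
  have hb : double_alt lst
      = ((PySem.Set.ofList lst).map
          (fun k => (lst.count k : Int) * (lst.count (2 * k) : Int))).sum := by
    unfold double_alt
    rw [PySem.Dict.foldl_insert_getD_add_one_eq_counter]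
    show (List.map (fun vc => vc.2 * (PySem.Dict.counter lst).getD (2 * vc.1) 0)
        (PySem.Dict.counter lst).items).sum = _
    rw [PySem.Dict.items_counter, List.map_map]
    apply congrArg List.sum
    apply List.map_congr_left
    intro k _
    simp [PySem.Dict.getD_counter]
  rw [ha, hb]
  exact (pv_group_sum (fun k => (lst.count (2 * k) : Int)) (PySem.Set.ofList lst) lst
    (PySem.Set.nodup_ofList lst) (fun x hx => (PySem.Set.mem_ofList lst x).mpr hx)).symm

-- ===== VERDICT (by name: the statement is the Claim_ definition above) =====
theorem double_spec : Claim_equal_double := by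
  intro lst _
  unfold Spec_double
  exact double_spec' lst
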